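-- pv_equiv track=rewrite | github.com/ales-git/ICHInsight | web_app/seg_model.py | impute_missing_boxes
-- ===== SOURCE A (Python) =====
-- def impute_missing_boxes(all_yolo_boxes, rect_coords):
--     """
--     Impute missing bounding boxes using the closest slice's bounding box.
--     If no bounding boxes are detected at all, use the user-provided coordinates.
--     """
--     last_valid_box = None
--
--     # Find indices of missing boxes
--     missing_indices = [i for i, box in enumerate(all_yolo_boxes) if box is None]
--
--     if not missing_indices:
--         return all_yolo_boxes
--
--     for idx in missing_indices:
--         # Find the closest valid bounding box
--         closest_valid_index = min(
--             (i for i in range(len(all_yolo_boxes)) if all_yolo_boxes[i] is not None),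
--             key=lambda i: abs(i - idx),
--             default=None
--         )
--         if closest_valid_index is not None:
--             all_yolo_boxes[idx] = all_yolo_boxes[closest_valid_index]
--
--     # If all boxes are still None, use the user-provided coordinates
--     if all(box is None for box in all_yolo_boxes):
--         all_yolo_boxes = [rect_coords for _ in range(len(all_yolo_boxes))]
--
--     return all_yolo_boxes
-- ===== SOURCE B (Python) =====
-- def impute_missing_boxes(all_yolo_boxes, rect_coords):
--     """
--     Impute missing bounding boxes using the closest slice's bounding box.
--     If no bounding boxes are detected at all, use the user-provided coordinates.
--     """
--     first = next((box for box in all_yolo_boxes if box is not None), None)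
--     if first is None:
--         # no detections at all: every slice gets the user-provided coordinates
--         return [rect_coords for _ in all_yolo_boxes]
--     out = []
--     cur = first
--     for box in all_yolo_boxes:
--         if box is not None:
--             cur = box
--         out.append(cur)
--     return out
-- ===== Notes on version B (the rewrite author's own statement) =====
-- stated objective: faster
-- what changed: Replaced the per-missing-index scan over all indices (min over the whole list for every hole) by a single left-to-right forward-fill pass in which the running last-seen box is carried along, leading holes getting the first valid box; B builds a new list instead of mutating the argument in place.
import Mathlib
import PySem

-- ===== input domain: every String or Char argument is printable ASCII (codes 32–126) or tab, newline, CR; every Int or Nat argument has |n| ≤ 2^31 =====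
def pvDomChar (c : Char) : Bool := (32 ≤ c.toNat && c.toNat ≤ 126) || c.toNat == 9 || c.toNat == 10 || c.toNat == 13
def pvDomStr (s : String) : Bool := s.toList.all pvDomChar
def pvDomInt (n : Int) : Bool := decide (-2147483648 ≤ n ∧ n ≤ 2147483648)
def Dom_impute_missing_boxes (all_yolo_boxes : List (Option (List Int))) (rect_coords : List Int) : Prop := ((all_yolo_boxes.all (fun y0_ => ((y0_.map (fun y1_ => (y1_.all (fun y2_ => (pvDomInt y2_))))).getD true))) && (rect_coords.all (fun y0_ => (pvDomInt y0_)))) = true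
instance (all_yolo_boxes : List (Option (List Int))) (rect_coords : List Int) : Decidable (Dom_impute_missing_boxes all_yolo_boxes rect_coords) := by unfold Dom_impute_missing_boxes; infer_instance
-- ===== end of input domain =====

-- B replaces A's per-hole scan (a min over all indices for every missing slice) by one
-- left-to-right forward-fill pass; equivalence is about the RETURN value only (Python A
-- mutates all_yolo_boxes in place, B builds a fresh list).


-- ===== PORT A =====
-- the body of A's `for idx in missing_indices` loop
def stepA (acc : List (Option (List Int))) (idx : Int) : List (Option (List Int)) :=
  match PySem.List.min?
      ((PySem.List.pyRange 0 (acc.length : Int) 1).filter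
        (fun i => (PySem.List.pyGetD acc i none).isSome))
      (fun i => |i - idx|) with
  | some j => PySem.List.pySetD acc idx (PySem.List.pyGetD acc j none)
  | none => acc

def impute_missing_boxes (all_yolo_boxes : List (Option (List Int))) (rect_coords : List Int) : List (Option (List Int)) :=
  let missing_indices :=
    ((PySem.List.enumerate all_yolo_boxes 0).filter (fun p => p.2.isNone)).map (fun p => p.1)
  if missing_indices = [] then all_yolo_boxes
  else
    let ys := missing_indices.foldl stepA all_yolo_boxes
    if ys.all (fun b => b.isNone) then ys.map (fun _ => some rect_coords) else ys

-- ===== PORT B =====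
-- next((box for box in all_yolo_boxes if box is not None), None)
def firstValid : List (Option (List Int)) → Option (List Int)
  | [] => none
  | none :: t => firstValid t
  | some b :: _ => some b

-- the forward-fill loop of B, carrying the running last-seen box `cur`
def ffillGo (cur : List Int) : List (Option (List Int)) → List (Option (List Int))
  | [] => []
  | none :: t => some cur :: ffillGo cur t
  | some b :: t => some b :: ffillGo b t

def impute_missing_boxes_alt (all_yolo_boxes : List (Option (List Int))) (rect_coords : List Int) : List (Option (List Int)) :=
  match firstValid all_yolo_boxes with
  | none => all_yolo_boxes.map (fun _ => some rect_coords)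
  | some fv => ffillGo fv all_yolo_boxes

-- ===== PRECONDITION & SPEC =====
def Spec_impute_missing_boxes (all_yolo_boxes : List (Option (List Int))) (rect_coords : List Int) (out : List (Option (List Int))) : Prop := out = impute_missing_boxes_alt all_yolo_boxes rect_coords
instance (all_yolo_boxes : List (Option (List Int))) (rect_coords : List Int) (out : List (Option (List Int))) : Decidable (Spec_impute_missing_boxes all_yolo_boxes rect_coords out) := by unfold Spec_impute_missing_boxes; infer_instance

-- ===== CLAIM (what is proved, stated in full; the proofs are below) =====
def Claim_equal_impute_missing_boxes : Prop := ∀ (all_yolo_boxes : List (Option (List Int))) (rect_coords : List Int), Dom_impute_missing_boxes all_yolo_boxes rect_coords → Spec_impute_missing_boxes all_yolo_boxes rect_coords (impute_missing_boxes all_yolo_boxes rect_coords)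

-- ===== LEMMAS AND PROOFS =====

-- ffillGo in uniform cons form
theorem ffillGo_cons (cur : List Int) (x : Option (List Int)) (t : List (Option (List Int))) :
    ffillGo cur (x :: t) = some (x.getD cur) :: ffillGo (x.getD cur) t := by
  cases x <;> rfl

theorem length_ffillGo (cur : List Int) (xs : List (Option (List Int))) :
    (ffillGo cur xs).length = xs.length := by
  induction xs generalizing cur with
  | nil => rfl
  | cons x t ih => rw [ffillGo_cons]; simp [ih]

theorem mem_ffillGo_ne_none (cur : List Int) (xs : List (Option (List Int))) :
    ∀ y ∈ ffillGo cur xs, y ≠ none := by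
  induction xs generalizing cur with
  | nil => simp [ffillGo]
  | cons x t ih => rw [ffillGo_cons]; simpa using ih (x.getD cur)

theorem ffillGo_getElem?_some (cur : List Int) (xs : List (Option (List Int))) (k : Nat) (b : List Int)
    (h : xs[k]? = some (some b)) : (ffillGo cur xs)[k]? = some (some b) := by
  induction xs generalizing cur k with
  | nil => simp at h
  | cons x t ih =>
    rw [ffillGo_cons]
    cases k with
    | zero => simp at h; simp [h]
    | succ k => simp at h ⊢; exact ih _ _ h

theorem ffillGo_getElem?_zero (cur : List Int) (xs : List (Option (List Int)))
    (h : xs[0]? = some none) : (ffillGo cur xs)[0]? = some (some cur) := by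
  cases xs with
  | nil => simp at h
  | cons x t => simp at h; subst h; rfl

theorem ffillGo_getElem?_succ (cur : List Int) (xs : List (Option (List Int))) (k : Nat)
    (h : xs[k + 1]? = some none) : (ffillGo cur xs)[k + 1]? = (ffillGo cur xs)[k]? := by
  induction xs generalizing cur k with
  | nil => simp at h
  | cons x t ih =>
    rw [ffillGo_cons]
    cases k with
    | zero =>
      simp at h ⊢
      rw [ffillGo_getElem?_zero _ _ (by simpa using h)]
    | succ k =>
      simp at h ⊢
      exact ih _ _ h

theorem ffillGo_id (cur : List Int) (xs : List (Option (List Int)))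
    (h : ∀ y ∈ xs, y ≠ none) : ffillGo cur xs = xs := by
  induction xs generalizing cur with
  | nil => rfl
  | cons x t ih =>
    rw [ffillGo_cons]
    have hx : x ≠ none := h x (by simp)
    cases x with
    | none => exact absurd rfl hx
    | some b => simp [ih b (fun y hy => h y (by simp [hy]))]

theorem firstValid_eq_none_iff (xs : List (Option (List Int))) :
    firstValid xs = none ↔ ∀ y ∈ xs, y = none := by
  induction xs with
  | nil => simp [firstValid]
  | cons x t ih =>
    cases x with
    | none => simpa [firstValid] using ih
    | some b => simp [firstValid]

theorem firstValid_spec (xs : List (Option (List Int))) (fv : List Int)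
    (h : firstValid xs = some fv) :
    ∃ j0 : Nat, xs[j0]? = some (some fv) ∧ ∀ k < j0, xs[k]? = some none := by
  induction xs with
  | nil => simp [firstValid] at h
  | cons x t ih =>
    cases x with
    | some b =>
      simp [firstValid] at h
      exact ⟨0, by simp [h], by omega⟩
    | none =>
      obtain ⟨j0, h1, h2⟩ := ih (by simpa [firstValid] using h)
      refine ⟨j0 + 1, by simpa using h1, ?_⟩
      intro k hk
      cases k with
      | zero => simp
      | succ k => simpa using h2 k (by omega)

-- A's loop is a no-op when every entry is missing: the candidate list is empty
theorem stepA_all_none (xs : List (Option (List Int))) (h : ∀ y ∈ xs, y = none) :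
    ∀ rest : List Int, rest.foldl stepA xs = xs := by
  have hstep : stepA xs = fun _ => xs := by
    funext idx
    have hfilter : (PySem.List.pyRange 0 (xs.length : Int) 1).filter
        (fun j => (PySem.List.pyGetD xs j none).isSome) = [] := by
      rw [List.filter_eq_nil_iff]
      intro a ha
      rw [PySem.List.mem_pyRange_one] at ha
      have hcast : a = ((a.toNat : Nat) : Int) := by omega
      rw [hcast, PySem.List.pyGetD_natCast]
      have : xs.getD a.toNat none = none := by
        rw [List.getD_eq_getElem?_getD]
        rcases h2 : xs[a.toNat]? with _ | y
        · rfl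
        · simp [h y (List.mem_of_getElem? h2)]
      rw [List.getD_eq_getElem?_getD] at this
      simp [this]
    unfold stepA
    rw [hfilter]
    rfl
  intro rest
  induction rest with
  | nil => rfl
  | cons r rest' ih => rw [List.foldl_cons, hstep]; exact ih


theorem min?_cons_cons (key : Int → Int) (m b : Int) (B : List Int) :
    PySem.List.min? (m :: b :: B) key = PySem.List.min? ((if key b < key m then b else m) :: B) key := by
  by_cases h : key b < key m <;> simp [PySem.List.min?, h]

theorem min?_stay (key : Int → Int) (m : Int) : ∀ B : List Int, (∀ b ∈ B, key m ≤ key b) →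
    PySem.List.min? (m :: B) key = some m := by
  intro B
  induction B with
  | nil => intro _; simp [PySem.List.min?]
  | cons b B' ih =>
    intro h
    rw [min?_cons_cons, if_neg (not_lt.mpr (h b (by simp)))]
    exact ih (fun x hx => h x (by simp [hx]))

theorem min?_drag (key : Int → Int) (m : Int) (B : List Int) (hB : ∀ b ∈ B, key m ≤ key b) :
    ∀ (A : List Int) (a : Int), key m < key a → (∀ x ∈ A, key m < key x) →
    PySem.List.min? (a :: (A ++ m :: B)) key = some m := by
  intro A
  induction A with
  | nil =>
    intro a ha _
    rw [List.nil_append, min?_cons_cons, if_pos ha]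
    exact min?_stay key m B hB
  | cons x A' ih =>
    intro a ha hA
    rw [List.cons_append, min?_cons_cons]
    have hx : key m < key x := hA x (by simp)
    by_cases h : key x < key a <;> simp only [h, if_true, if_false]
    · exact ih x hx (fun y hy => hA y (by simp [hy]))
    · exact ih a ha (fun y hy => hA y (by simp [hy]))

theorem min?_split (key : Int → Int) (A B : List Int) (m : Int)
    (hA : ∀ a ∈ A, key m < key a) (hB : ∀ b ∈ B, key m ≤ key b) :
    PySem.List.min? (A ++ m :: B) key = some m := by
  cases A with
  | nil => exact min?_stay key m B hB
  | cons a A' =>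
    exact min?_drag key m B hB A' a (hA a (by simp)) (fun x hx => hA x (by simp [hx]))


theorem missing_mem (xs : List (Option (List Int))) (s : Int) (j : Int) :
    j ∈ ((PySem.List.enumerate xs s).filter (fun p => p.2.isNone)).map (fun p => p.1) ↔
      ∃ k : Nat, k < xs.length ∧ j = s + (k : Int) ∧ xs[k]? = some none := by
  induction xs generalizing s with
  | nil => simp [PySem.List.enumerate_nil]
  | cons x t ih =>
    rw [PySem.List.enumerate_cons]
    cases x with
    | none =>
      simp only [List.filter_cons]
      norm_num [ih]
      constructor
      · rintro (rfl | ⟨k, hk, rfl, hget⟩)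
        · exact ⟨0, by simp⟩
        · exact ⟨k + 1, by omega, by push_cast; ring, by simpa using hget⟩
      · rintro ⟨k, hk, rfl, hget⟩
        cases k with
        | zero => left; simp
        | succ k => right; exact ⟨k, by omega, by push_cast; ring, by simpa using hget⟩
    | some b =>
      simp only [List.filter_cons]
      norm_num [ih]
      constructor
      · rintro ⟨k, hk, rfl, hget⟩
        exact ⟨k + 1, by omega, by push_cast; ring, by simpa using hget⟩
      · rintro ⟨k, hk, rfl, hget⟩
        cases k with
        | zero => simp at hget
        | succ k => exact ⟨k, by omega, by push_cast; ring, by simpa using hget⟩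

theorem missing_pairwise (xs : List (Option (List Int))) (s : Int) :
    (((PySem.List.enumerate xs s).filter (fun p => p.2.isNone)).map (fun p => p.1)).Pairwise (· < ·) := by
  have hsub := (@List.filter_sublist _ (fun p => p.2.isNone) (PySem.List.enumerate xs s)).map
      (fun p : Int × Option (List Int) => p.1)
  have hp : ((PySem.List.enumerate xs s).map (fun p => p.1)).Pairwise (· < ·) := by
    rw [show (fun (p : Int × Option (List Int)) => p.1) = (Prod.fst : Int × Option (List Int) → Int) from rfl,
      PySem.List.map_fst_enumerate]
    exact PySem.List.pairwise_lt_pyRange_one s (s + xs.length)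
  exact hp.sublist hsub

theorem getElem?_take_append_drop {α : Type} (F xs : List α) (t k : Nat)
    (hlen : F.length = xs.length) (ht : t ≤ xs.length) :
    (F.take t ++ xs.drop t)[k]? = if k < t then F[k]? else xs[k]? := by
  by_cases h : k < t
  · rw [List.getElem?_append_left (by simp; omega), List.getElem?_take_of_lt h, if_pos h]
  · rw [List.getElem?_append_right (by simp; omega), if_neg h]
    have h1 : (F.take t).length = t := by simp; omega
    rw [h1, List.getElem?_drop]
    congr 1; omega



theorem stepSel_pos (acc : List (Option (List Int))) (i : Nat) (h0 : 0 < i) (hn : i < acc.length)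
    (hprev : acc.getD (i - 1) none ≠ none) (hcur : acc.getD i none = none) :
    PySem.List.min?
      ((PySem.List.pyRange 0 (acc.length : Int) 1).filter
        (fun j => (PySem.List.pyGetD acc j none).isSome))
      (fun j => |j - (i : Int)|) = some ((i : Int) - 1) := by
  have hsplit : PySem.List.pyRange 0 (acc.length : Int) 1 =
      PySem.List.pyRange 0 ((i : Int) - 1) 1 ++ (((i : Int) - 1) :: (i : Int) ::
        PySem.List.pyRange ((i : Int) + 1) (acc.length : Int) 1) := by
    rw [PySem.List.pyRange_one_append 0 ((i : Int) - 1) (acc.length : Int) (by omega) (by omega)]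
    congr 1
    rw [PySem.List.pyRange_one_cons (by omega), PySem.List.pyRange_one_cons (by omega)]
    norm_num
  have hcast : ((i : Int) - 1) = ((i - 1 : Nat) : Int) := by omega
  have hp1 : (PySem.List.pyGetD acc ((i : Int) - 1) none).isSome = true := by
    rw [hcast, PySem.List.pyGetD_natCast]
    simpa [Option.isSome_iff_ne_none] using hprev
  have hp2 : (PySem.List.pyGetD acc (i : Int) none).isSome = false := by
    rw [PySem.List.pyGetD_natCast]
    simp [-List.getD_eq_getElem?_getD, hcur]
  rw [hsplit, List.filter_append, List.filter_cons, List.filter_cons, hp1, hp2]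
  simp only [if_true]
  norm_num
  apply min?_split
  · intro a ha
    rw [List.mem_filter, PySem.List.mem_pyRange_one] at ha
    have h1 : |(i : Int) - 1 - (i : Int)| = 1 := by rw [abs_of_nonpos (by omega)]; omega
    have h2 : |a - (i : Int)| = (i : Int) - a := by rw [abs_of_nonpos (by omega)]; omega
    omega
  · intro b hb
    have h1 : |(i : Int) - 1 - (i : Int)| = 1 := by rw [abs_of_nonpos (by omega)]; omega
    rcases List.mem_filter.mp hb with ⟨hb', _⟩
    rw [PySem.List.mem_pyRange_one] at hb'
    have h2 : |b - (i : Int)| = b - (i : Int) := by rw [abs_of_nonneg (by omega)]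
    omega

theorem stepSel_zero (acc : List (Option (List Int))) (j0 : Nat) (hn : j0 < acc.length)
    (hvalid : acc.getD j0 none ≠ none) (hbefore : ∀ k < j0, acc.getD k none = none) :
    PySem.List.min?
      ((PySem.List.pyRange 0 (acc.length : Int) 1).filter
        (fun j => (PySem.List.pyGetD acc j none).isSome))
      (fun j => |j - ((0 : Nat) : Int)|) = some (j0 : Int) := by
  have hsplit : PySem.List.pyRange 0 (acc.length : Int) 1 =
      PySem.List.pyRange 0 (j0 : Int) 1 ++ ((j0 : Int) ::
        PySem.List.pyRange ((j0 : Int) + 1) (acc.length : Int) 1) := by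
    rw [PySem.List.pyRange_one_append 0 (j0 : Int) (acc.length : Int) (by omega) (by omega)]
    congr 1
    rw [PySem.List.pyRange_one_cons (by omega)]
  have hleft : (PySem.List.pyRange 0 (j0 : Int) 1).filter
      (fun j => (PySem.List.pyGetD acc j none).isSome) = [] := by
    rw [List.filter_eq_nil_iff]
    intro a ha
    rw [PySem.List.mem_pyRange_one] at ha
    have hcast : a = ((a.toNat : Nat) : Int) := by omega
    rw [hcast, PySem.List.pyGetD_natCast]
    simp [-List.getD_eq_getElem?_getD, hbefore a.toNat (by omega)]
  have hpj : (PySem.List.pyGetD acc (j0 : Int) none).isSome = true := by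
    rw [PySem.List.pyGetD_natCast]
    simpa [Option.isSome_iff_ne_none] using hvalid
  rw [hsplit, List.filter_append, hleft, List.filter_cons, hpj]
  simp only [if_true, List.nil_append]
  have := min?_split (fun j => |j - ((0 : Nat) : Int)|) []
      ((PySem.List.pyRange ((j0 : Int) + 1) (acc.length : Int) 1).filter
        (fun j => (PySem.List.pyGetD acc j none).isSome)) (j0 : Int)
  rw [List.nil_append] at this
  apply this
  · intro a ha; simp at ha
  · intro b hb
    rcases List.mem_filter.mp hb with ⟨hb', _⟩
    rw [PySem.List.mem_pyRange_one] at hb'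
    have h1 : |(j0 : Int) - ((0:Nat) : Int)| = (j0 : Int) := by
      rw [abs_of_nonneg (by omega)]; omega
    have h2 : |b - ((0:Nat) : Int)| = b := by rw [abs_of_nonneg (by omega)]; omega
    omega

theorem stepA_eq_of_min (acc : List (Option (List Int))) (idx j : Int)
    (h : PySem.List.min?
      ((PySem.List.pyRange 0 (acc.length : Int) 1).filter
        (fun i => (PySem.List.pyGetD acc i none).isSome))
      (fun i => |i - idx|) = some j) :
    stepA acc idx = PySem.List.pySetD acc idx (PySem.List.pyGetD acc j none) := by
  unfold stepA; rw [h]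

theorem loop_inv (xs : List (Option (List Int))) (fv : List Int) (hfv : firstValid xs = some fv) :
    ∀ (rest : List Int) (t : Nat), t ≤ xs.length →
      rest.Pairwise (· < ·) →
      (∀ i ∈ rest, (t : Int) ≤ i ∧ i < xs.length) →
      (∀ k : Nat, t ≤ k → k < xs.length → (xs[k]? = some none ↔ (k : Int) ∈ rest)) →
      rest.foldl stepA ((ffillGo fv xs).take t ++ xs.drop t) = ffillGo fv xs := by
  intro rest
  induction rest with
  | nil =>
    intro t ht _ _ hiff
    simp only [List.foldl_nil]
    apply List.ext_getElem?
    intro k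
    rw [getElem?_take_append_drop _ _ _ _ (length_ffillGo fv xs) ht]
    by_cases hk : k < t
    · simp [hk]
    · rw [if_neg hk]
      by_cases hk2 : k < xs.length
      · have hne : xs[k]? ≠ some none := fun hc => by simpa using (hiff k (by omega) hk2).mp hc
        have hsome : ∃ b, xs[k]? = some (some b) := by
          rcases h2 : xs[k]? with _ | y
          · exact absurd (List.getElem?_eq_none_iff.mp h2) (by omega)
          · cases y with
            | none => exact absurd h2 hne
            | some b => exact ⟨b, rfl⟩
        obtain ⟨b, hb⟩ := hsome
        rw [hb, ffillGo_getElem?_some _ _ _ _ hb]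
      · rw [List.getElem?_eq_none (by omega), List.getElem?_eq_none (by rw [length_ffillGo]; omega)]
  | cons idx rest' ih =>
    intro t ht hpw hbnd hiff
    have hidx := hbnd idx (by simp)
    obtain ⟨i, hidxi⟩ : ∃ i : Nat, idx = (i : Int) := ⟨idx.toNat, by omega⟩
    have hin : i < xs.length := by omega
    have hti : t ≤ i := by omega
    set F := ffillGo fv xs with hF
    have hlenF : F.length = xs.length := length_ffillGo fv xs
    set acc := F.take t ++ xs.drop t with hacc
    have hlenacc : acc.length = xs.length := by
      rw [hacc]; simp; omega
    have haccget : ∀ k : Nat, acc[k]? = if k < t then F[k]? else xs[k]? :=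
      fun k => getElem?_take_append_drop F xs t k hlenF ht
    -- entries of F in range are some
    have hFsome : ∀ k : Nat, k < xs.length → F[k]? ≠ some none := by
      intro k hk hc
      exact mem_ffillGo_ne_none fv xs none (List.mem_of_getElem? hc) rfl
    -- xs has a none at i
    have hxsi : xs[i]? = some none := (hiff i hti hin).mpr (by rw [← hidxi]; simp)
    -- acc at i is none
    have hacci : acc.getD i none = none := by
      rw [List.getD_eq_getElem?_getD, haccget i, if_neg (by omega), hxsi]; rfl
    -- everything strictly left of i in acc is non-none
    have hleft : ∀ k : Nat, k < i → acc[k]? ≠ some none := by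
      intro k hk hc
      rw [haccget k] at hc
      by_cases h1 : k < t
      · rw [if_pos h1] at hc; exact hFsome k (by omega) hc
      · rw [if_neg h1] at hc
        have := (hiff k (by omega) (by omega)).mp hc
        rw [List.mem_cons] at this
        rcases this with h2 | h2
        · omega
        · rcases List.pairwise_cons.mp hpw with ⟨hhead, _⟩
          have := hhead _ h2
          omega
    -- the iff for the tail at t' = i + 1
    have hiff' : ∀ k : Nat, i + 1 ≤ k → k < xs.length → (xs[k]? = some none ↔ (k : Int) ∈ rest') := by
      intro k hk hk2
      rw [hiff k (by omega) hk2, List.mem_cons]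
      constructor
      · rintro (h | h)
        · exfalso; omega
        · exact h
      · exact fun h => Or.inr h
    have hbnd' : ∀ j ∈ rest', ((i + 1 : Nat) : Int) ≤ j ∧ j < xs.length := by
      intro j hj
      rcases List.pairwise_cons.mp hpw with ⟨hhead, _⟩
      have h1 := hhead _ hj
      have h2 := hbnd j (by simp [hj])
      push_cast
      omega
    have hpw' : rest'.Pairwise (· < ·) := (List.pairwise_cons.mp hpw).2
    -- the step: two cases on i
    have hstep : stepA acc idx = F.take (i + 1) ++ xs.drop (i + 1) := by
      rcases Nat.eq_zero_or_pos i with hi0 | hipos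
      · -- i = 0: t = 0, acc = xs; min picks the first valid index j0
        subst hi0
        have ht0 : t = 0 := by omega
        obtain ⟨j0, hj0v, hj0b⟩ := firstValid_spec xs fv hfv
        have hj0n : j0 < xs.length := by
          by_contra hc
          rw [List.getElem?_eq_none (by omega)] at hj0v; simp at hj0v
        have hj0pos : 0 < j0 := by
          rcases Nat.eq_zero_or_pos j0 with h | h
          · subst h; rw [hxsi] at hj0v; simp at hj0v
          · exact h
        have haccxs : acc = xs := by rw [hacc, ht0]; simp
        have hmin := stepSel_zero acc j0 (by omega)
          (by rw [haccxs, List.getD_eq_getElem?_getD, hj0v]; simp)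
          (by intro k hk; rw [haccxs, List.getD_eq_getElem?_getD, hj0b k hk]; rfl)
        rw [hidxi, stepA_eq_of_min acc _ _ hmin]
        have hget : PySem.List.pyGetD acc ((j0 : Nat) : Int) none = some fv := by
          rw [PySem.List.pyGetD_natCast, haccxs, List.getD_eq_getElem?_getD, hj0v]; rfl
        rw [hget, PySem.List.pySetD_natCast]
        -- goal: acc.set 0 (some fv) = F.take 1 ++ xs.drop 1
        apply List.ext_getElem?
        intro k
        rw [List.getElem?_set, getElem?_take_append_drop F xs 1 k hlenF (by omega)]
        by_cases hk0 : k = 0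
        · subst hk0
          rw [if_pos rfl, if_pos (by omega), if_pos (by omega)]
          exact (ffillGo_getElem?_zero fv xs hxsi).symm
        · rw [if_neg (Ne.symm hk0), if_neg (by omega), haccget k, if_neg (by omega)]
      · -- i > 0
        have hprev : acc.getD (i - 1) none ≠ none := by
          rw [List.getD_eq_getElem?_getD]
          intro hc
          rcases h2 : acc[i - 1]? with _ | y
          · have : acc.length ≤ i - 1 := by
              rw [← List.getElem?_eq_none_iff]; exact h2
            omega
          · rw [h2] at hc
            cases y with
            | none => exact hleft (i - 1) (by omega) h2
            | some b => simp at hc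
        have hmin := stepSel_pos acc i hipos (by omega) hprev hacci
        rw [hidxi, stepA_eq_of_min acc _ _ hmin]
        have hcast : ((i : Int) - 1) = ((i - 1 : Nat) : Int) := by omega
        -- the value written is F[i-1] = F[i]
        have hFi : F[i]? = F[i - 1]? := by
          have := ffillGo_getElem?_succ fv xs (i - 1) (by
            have : i - 1 + 1 = i := by omega
            rw [this]; exact hxsi)
          have h2 : i - 1 + 1 = i := by omega
          rw [h2] at this; exact this
        have haccprev : acc[i - 1]? = F[i - 1]? := by
          rw [haccget]
          by_cases h1 : i - 1 < t
          · rw [if_pos h1]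
          · rw [if_neg h1]
            have hne : xs[i - 1]? ≠ some none := by
              intro hc
              exact hleft (i - 1) (by omega) (by rw [haccget, if_neg h1]; exact hc)
            rcases h2 : xs[i - 1]? with _ | y
            · exfalso; have : xs.length ≤ i - 1 := by rw [← List.getElem?_eq_none_iff]; exact h2
              omega
            · cases y with
              | none => exact absurd h2 hne
              | some b => rw [ffillGo_getElem?_some fv xs _ b h2]
        obtain ⟨v, hv⟩ : ∃ v, F[i - 1]? = some v := by
          rcases h2 : F[i - 1]? with _ | y
          · exfalso; have : F.length ≤ i - 1 := by rw [← List.getElem?_eq_none_iff]; exact h2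
            omega
          · exact ⟨y, rfl⟩
        have hget : PySem.List.pyGetD acc ((i : Int) - 1) none = v := by
          rw [hcast, PySem.List.pyGetD_natCast, List.getD_eq_getElem?_getD, haccprev, hv]; rfl
        rw [hget, PySem.List.pySetD_natCast]
        apply List.ext_getElem?
        intro k
        rw [List.getElem?_set, getElem?_take_append_drop F xs (i + 1) k hlenF (by omega)]
        by_cases hki : k = i
        · subst hki
          rw [if_pos rfl, hlenacc, if_pos (by omega), if_pos (by omega), hFi, hv]
        · rw [if_neg (fun hc => hki hc.symm), haccget k]
          by_cases hk1 : k < t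
          · rw [if_pos hk1, if_pos (by omega)]
          · rw [if_neg hk1]
            by_cases hk2 : k < i + 1
            · rw [if_pos hk2]
              -- t ≤ k < i : xs[k]? = F[k]?
              have hne : xs[k]? ≠ some none := by
                intro hc
                exact hleft k (by omega) (by rw [haccget, if_neg hk1]; exact hc)
              rcases h2 : xs[k]? with _ | y
              · exfalso
                have hklen : xs.length ≤ k := by rw [← List.getElem?_eq_none_iff]; exact h2
                have hFk : F[k]? = none := List.getElem?_eq_none (by omega)
                omega
              · cases y with
                | none => exact absurd h2 hne
                | some b => rw [ffillGo_getElem?_some fv xs _ b h2]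
            · rw [if_neg hk2]
    rw [List.foldl_cons, hstep]
    exact ih (i + 1) (by omega) hpw' hbnd' hiff'


-- ===== VERDICT (by name: the statement is the Claim_ definition above) =====
theorem impute_missing_boxes_spec : Claim_equal_impute_missing_boxes := by
  unfold Claim_equal_impute_missing_boxes
  intro xs rc _
  unfold Spec_impute_missing_boxes impute_missing_boxes impute_missing_boxes_alt
  simp only []
  set missing := ((PySem.List.enumerate xs 0).filter (fun p => p.2.isNone)).map (fun p => p.1)
    with hmiss
  by_cases hm : missing = []
  · rw [if_pos hm]
    have hnone : ∀ y ∈ xs, y ≠ none := by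
      intro y hy hc
      subst hc
      obtain ⟨k, hget⟩ := List.mem_iff_getElem?.mp hy
      have hk : k < xs.length := by
        by_contra hcc
        rw [List.getElem?_eq_none (by omega)] at hget
        simp at hget
      have hmem : ((k : Nat) : Int) ∈ missing :=
        (missing_mem xs 0 (k : Int)).mpr ⟨k, hk, by simp, hget⟩
      rw [hm] at hmem
      simp at hmem
    cases hfv : firstValid xs with
    | none =>
      have := (firstValid_eq_none_iff xs).mp hfv
      cases xs with
      | nil => simp
      | cons x t => exact absurd (this x (by simp)) (hnone x (by simp))
    | some fv => exact (ffillGo_id fv xs hnone).symm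
  · rw [if_neg hm]
    have hxs_ne : xs ≠ [] := by
      intro hc
      subst hc
      simp [PySem.List.enumerate_nil] at hmiss
      exact hm hmiss
    cases hfv : firstValid xs with
    | none =>
      have hall : ∀ y ∈ xs, y = none := (firstValid_eq_none_iff xs).mp hfv
      rw [stepA_all_none xs hall missing, if_pos]
      rw [List.all_eq_true]
      intro y hy
      simp [hall y hy]
    | some fv =>
      have hbnd0 : ∀ i ∈ missing, ((0 : Nat) : Int) ≤ i ∧ i < xs.length := by
        intro i hi
        obtain ⟨k, hk, rfl, _⟩ := (missing_mem xs 0 i).mp hi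
        constructor <;> [simp; omega]
      have hiff0 : ∀ k : Nat, (0 : Nat) ≤ k → k < xs.length →
          (xs[k]? = some none ↔ (k : Int) ∈ missing) := by
        intro k _ hk
        rw [missing_mem xs 0 (k : Int)]
        constructor
        · intro h; exact ⟨k, hk, by simp, h⟩
        · rintro ⟨k', hk', hkk, hget⟩
          have : k = k' := by omega
          subst this
          exact hget
      have hloop := loop_inv xs fv hfv missing 0 (by omega) (missing_pairwise xs 0) hbnd0 hiff0
      rw [List.take_zero, List.drop_zero, List.nil_append] at hloop
      rw [hloop]
      rw [if_neg]
      intro hc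
      have h0 : (ffillGo fv xs)[0]? ≠ none := by
        intro hlen0
        rw [List.getElem?_eq_none_iff, length_ffillGo] at hlen0
        exact hxs_ne (List.eq_nil_of_length_eq_zero (by omega))
      rcases h2 : (ffillGo fv xs)[0]? with _ | y
      · exact h0 h2
      · have hy := List.mem_of_getElem? h2
        have := List.all_eq_true.mp hc y hy
        exact mem_ffillGo_ne_none fv xs y hy (by simpa using this)
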